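-- pv_equiv track=rewrite | github.com/jonzim-cmd/kura-training | workers/src/kura_workers/recovery_daily_checkin.py | _parse_compact_positional
-- ===== SOURCE A (Python) =====
-- from typing import Any
--
-- _POSITIONAL_FIELDS: tuple[str, ...] = (
--     "bodyweight_kg",
--     "sleep_hours",
--     "soreness",
--     "motivation",
--     "hrv_rmssd",
--     "sick_today",
--     "traveling_yesterday",
--     "alcohol_last_night",
--     "sleep_quality",
--     "physical_condition",
--     "lifestyle_stability",
-- )
--
-- def _parse_compact_positional(raw_compact: str) -> tuple[dict[str, Any], list[str]]:
--     parsed: dict[str, Any] = {}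
--     flags: list[str] = []
--     tokens = [token.strip() for token in raw_compact.split(",")]
--     tokens = [token for token in tokens if token]
--     for idx, token in enumerate(tokens):
--         if idx >= len(_POSITIONAL_FIELDS):
--             flags.append(f"compact_extra_token_ignored:{token}")
--             continue
--         parsed[_POSITIONAL_FIELDS[idx]] = token
--     return parsed, flags
-- ===== SOURCE B (Python) =====
-- _POSITIONAL_FIELDS: tuple[str, ...] = (
--     "bodyweight_kg",
--     "sleep_hours",
--     "soreness",
--     "motivation",
--     "hrv_rmssd",
--     "sick_today",
--     "traveling_yesterday",
--     "alcohol_last_night",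
--     "sleep_quality",
--     "physical_condition",
--     "lifestyle_stability",
-- )
--
-- def _parse_compact_positional(raw_compact):
--     # Single character-level scan (no split/strip preprocessing): a buffer
--     # collects the current token with leading whitespace skipped on the fly;
--     # at each comma (a sentinel comma is appended so the last token flushes too)
--     # trailing whitespace is popped, and a non-empty token is bound to the
--     # next unused field from a queue, or flagged once the queue is empty.
--     parsed = {}
--     flags = []
--     fields = list(_POSITIONAL_FIELDS)
--     buf = []
--     for ch in raw_compact + ",":
--         if ch == ",":
--             while buf and buf[-1].isspace():
--                 buf.pop()
--             if buf:
--                 token = "".join(buf)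
--                 if fields:
--                     parsed[fields.pop(0)] = token
--                 else:
--                     flags.append("compact_extra_token_ignored:" + token)
--             buf = []
--         elif buf or not ch.isspace():
--             buf.append(ch)
--     return parsed, flags
-- ===== Notes on version B (the rewrite author's own statement) =====
-- stated objective: alternative
-- what changed: Replaces A's pipeline (split on commas, strip each token, filter empties, indexed loop with a bound check) by a single character-level scanner: one pass over the raw string with a buffer that skips leading whitespace and pops trailing whitespace at each comma, binding each finished token to the next field from a queue or flagging it once the queue is empty.
import Mathlib
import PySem

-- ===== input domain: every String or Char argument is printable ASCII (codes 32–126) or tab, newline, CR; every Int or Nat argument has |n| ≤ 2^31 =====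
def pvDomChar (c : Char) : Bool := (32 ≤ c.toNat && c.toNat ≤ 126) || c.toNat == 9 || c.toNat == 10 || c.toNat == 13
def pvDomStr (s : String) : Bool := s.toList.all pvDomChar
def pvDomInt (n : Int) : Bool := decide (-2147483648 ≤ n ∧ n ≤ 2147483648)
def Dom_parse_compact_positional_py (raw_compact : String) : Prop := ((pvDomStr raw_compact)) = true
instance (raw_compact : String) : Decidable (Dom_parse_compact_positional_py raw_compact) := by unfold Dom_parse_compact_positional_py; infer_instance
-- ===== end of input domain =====

-- B replaces A's pipeline (split on commas, strip each token, filter empties, indexed loop with a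
-- bound check) by a single character-level scanner with a token buffer and a field queue
-- (objective: alternative decomposition, same asymptotic cost).

-- ===== PORT A =====
-- _POSITIONAL_FIELDS
def pcFields : List String :=
  ["bodyweight_kg", "sleep_hours", "soreness", "motivation", "hrv_rmssd",
   "sick_today", "traveling_yesterday", "alcohol_last_night", "sleep_quality",
   "physical_condition", "lifestyle_stability"]

-- the 'for idx, token in enumerate(tokens)' loop over state (parsed, flags);
-- pyGetD is exact here because the else-branch guarantees 0 ≤ idx < len(_POSITIONAL_FIELDS)
def pcLoopA : List (Int × String) → PySem.Dict String String × List String →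
    PySem.Dict String String × List String
  | [], st => st
  | (idx, token) :: rest, st =>
      if (pcFields.length : Int) ≤ idx then
        pcLoopA rest (st.1, st.2 ++ ["compact_extra_token_ignored:" ++ token])
      else
        pcLoopA rest (st.1.insert (PySem.List.pyGetD pcFields idx "") token, st.2)

def parse_compact_positional_py (raw_compact : String) : (List (String × String)) × List String :=
  let tokens := ((PySem.Str.split? raw_compact ",").getD []).map PySem.Str.strip
  let tokens := tokens.filter (fun t => !(t == ""))
  let st := pcLoopA (PySem.List.enumerate tokens 0) (PySem.Dict.empty, [])
  (st.1.items, st.2)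

-- ===== PORT B =====
-- 'while buf and buf[-1].isspace(): buf.pop()' — the trailing-whitespace pop loop,
-- expressed as dropWhile on the reversed buffer (exact: pops exactly the maximal
-- whitespace suffix)
def pcRtrim (buf : List Char) : List Char :=
  (buf.reverse.dropWhile PySem.Chars.isspace).reverse

-- the 'for ch in raw_compact + ","' loop; state = (buf, fields queue, parsed, flags).
-- B's dict only ever receives fresh keys (each field is popped from the queue once),
-- so the insertion-order association list grows by plain append — exact for Python's dict.
def pcScanB : List Char → List Char → List String → List (String × String) → List String →
    (List (String × String)) × List String
  | [], _, _, parsed, flags => (parsed, flags)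
  | c :: rest, buf, fields, parsed, flags =>
      if c = ',' then
        let t := pcRtrim buf
        if t = [] then pcScanB rest [] fields parsed flags
        else
          match fields with
          | f :: fs => pcScanB rest [] fs (parsed ++ [(f, String.ofList t)]) flags
          | [] => pcScanB rest [] [] parsed
              (flags ++ ["compact_extra_token_ignored:" ++ String.ofList t])
      else if !buf.isEmpty || !(PySem.Chars.isspace c) then
        pcScanB rest (buf ++ [c]) fields parsed flags
      else
        pcScanB rest buf fields parsed flags

def parse_compact_positional_py_alt (raw_compact : String) : (List (String × String)) × List String :=
  pcScanB (raw_compact.toList ++ [',']) [] pcFields [] []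

-- ===== PRECONDITION & SPEC =====
def Spec_parse_compact_positional_py (raw_compact : String) (out : (List (String × String)) × List String) : Prop := out = parse_compact_positional_py_alt raw_compact
instance (raw_compact : String) (out : (List (String × String)) × List String) : Decidable (Spec_parse_compact_positional_py raw_compact out) := by unfold Spec_parse_compact_positional_py; infer_instance

-- ===== CLAIM (what is proved, stated in full; the proofs are below) =====
def Claim_equal_parse_compact_positional_py : Prop := ∀ (raw_compact : String), Dom_parse_compact_positional_py raw_compact → Spec_parse_compact_positional_py raw_compact (parse_compact_positional_py raw_compact)

-- ===== LEMMAS AND PROOFS =====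

-- the comma-segments of p ++ cs where p is the (already consumed) head of the first segment
def pcSegs : List Char → List Char → List (List Char)
  | [], p => [p]
  | c :: rest, p => if c = ',' then p :: pcSegs rest [] else pcSegs rest (p ++ [c])

-- the stripped non-empty tokens of those segments
def pcToks (cs p : List Char) : List String :=
  (pcSegs cs p).filterMap (fun seg =>
    if PySem.Chars.strip seg = [] then none else some (String.ofList (PySem.Chars.strip seg)))

def pcFlag (t : String) : String := "compact_extra_token_ignored:" ++ t

lemma pcFields_nodup : pcFields.Nodup := by decide

-- A's enumerate loop characterised
lemma pcLoopA_spec (tokens : List String) (k : Nat) (d : PySem.Dict String String)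
    (fl : List String) (hkeys : d.keys = pcFields.take k) :
    pcLoopA (PySem.List.enumerate tokens (k : Int)) (d, fl) =
      (PySem.Dict.mk (d.items ++ (pcFields.drop k).zip tokens),
       fl ++ (tokens.drop (pcFields.length - k)).map pcFlag) := by
  induction tokens generalizing k d fl with
  | nil =>
      simp [PySem.List.enumerate_nil, pcLoopA]
  | cons t rest ih =>
      rw [PySem.List.enumerate_cons]
      by_cases hk : pcFields.length ≤ k
      · have hg : (pcFields.length : Int) ≤ (k : Int) := by exact_mod_cast hk
        rw [pcLoopA, if_pos hg]
        have : ((k : Int) + 1) = ((k + 1 : Nat) : Int) := by push_cast; ring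
        rw [this, ih (k + 1) d _ (by rw [hkeys]; rw [List.take_of_length_le hk,
          List.take_of_length_le (by omega)])]
        have hd : pcFields.drop k = [] := List.drop_eq_nil_of_le hk
        have hd' : pcFields.drop (k + 1) = [] := List.drop_eq_nil_of_le (by omega)
        have h1 : pcFields.length - k = 0 := by omega
        have h2 : pcFields.length - (k + 1) = 0 := by omega
        simp [hd, hd', h1, h2, pcFlag]
      · rw [not_le] at hk
        have hg : ¬ (pcFields.length : Int) ≤ (k : Int) := by exact_mod_cast not_le.mpr hk
        rw [pcLoopA, if_neg hg]
        have hget : PySem.List.pyGetD pcFields (k : Int) "" = pcFields[k] := by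
          rw [PySem.List.pyGetD_natCast]; simp [List.getD, hk]
        have hnc : d.contains pcFields[k] = false := by
          rw [PySem.Dict.contains_eq_decide_mem_keys, hkeys]
          simp only [decide_eq_false_iff_not]
          intro hmem
          rcases List.mem_take_iff_getElem.mp hmem with ⟨j, hj, hje⟩
          have : j = k := (List.Nodup.getElem_inj_iff pcFields_nodup).mp hje
          omega
        have hkeys' : (d.insert pcFields[k] t).keys = pcFields.take (k + 1) := by
          rw [PySem.Dict.keys_insert_of_not_contains _ _ hnc, hkeys,
            List.take_add_one, List.getElem?_eq_getElem hk]
          simp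
        have : ((k : Int) + 1) = ((k + 1 : Nat) : Int) := by push_cast; ring
        rw [hget, this, ih (k + 1) _ _ hkeys']
        have hitems : (d.insert pcFields[k] t).items = d.items ++ [(pcFields[k], t)] :=
          PySem.Dict.items_insert_of_not_contains _ _ hnc
        have hdrop : pcFields.drop k = pcFields[k] :: pcFields.drop (k + 1) :=
          List.drop_eq_getElem_cons hk
        have hflag : pcFields.length - k = (pcFields.length - (k + 1)) + 1 := by omega
        rw [hitems, hflag]
        simp only [List.zip]
        conv_rhs => rw [hdrop]
        simp only [List.zipWith_cons_cons, List.drop_succ_cons, List.append_assoc,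
          List.cons_append, List.nil_append]

-- splitOn's fuelled worker, specialised to the separator [','], is pcSegs
lemma splitOn_go_comma (fuel : Nat) (cs cur : List Char) (acc : List (List Char))
    (h : cs.length < fuel) :
    PySem.Chars.splitOn.go [','] fuel cs cur acc = acc.reverse ++ pcSegs cs cur.reverse := by
  induction fuel generalizing cs cur acc with
  | zero => omega
  | succ n ih =>
      cases cs with
      | nil => simp [PySem.Chars.splitOn.go, pcSegs]
      | cons c rest =>
          rw [PySem.Chars.splitOn.go]
          by_cases hc : c = ','
          · subst hc
            simp only [List.isPrefixOf]
            rw [if_pos (by simp)]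
            simp only [List.length_cons, List.length_nil, List.drop_succ_cons, List.drop_zero]
            rw [ih rest [] (cur.reverse :: acc) (by simp at h ⊢; omega)]
            simp [pcSegs]
          · rw [if_neg (by simp [List.isPrefixOf]; exact fun h => hc h.symm)]
            rw [ih rest (c :: cur) acc (by simp at h ⊢; omega)]
            simp [pcSegs, hc]

lemma splitOn_comma (cs : List Char) :
    PySem.Chars.splitOn cs [','] = pcSegs cs [] := by
  rw [PySem.Chars.splitOn, splitOn_go_comma (cs.length + 1) cs [] [] (by omega)]
  simp

-- strip commutes with String.ofList
lemma strip_ofList (seg : List Char) :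
    PySem.Str.strip (String.ofList seg) = String.ofList (PySem.Chars.strip seg) := by
  rw [PySem.Str.strip, String.toList_ofList]

-- A's map-strip-filter over segments is the filterMap form
lemma mapStripFilter_eq_filterMap (L : List (List Char)) :
    ((L.map (fun seg => String.ofList (PySem.Chars.strip seg))).filter (fun t => !(t == ""))) =
      L.filterMap (fun seg =>
        if PySem.Chars.strip seg = [] then none else some (String.ofList (PySem.Chars.strip seg))) := by
  induction L with
  | nil => rfl
  | cons seg L ih =>
      simp only [List.map_cons, List.filter_cons, List.filterMap_cons]
      by_cases hs : PySem.Chars.strip seg = []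
      · rw [hs, if_pos rfl]
        have h1 : (String.ofList ([] : List Char) == "") = true := by decide
        rw [h1]; simpa using ih
      · rw [if_neg hs]
        have h1 : (String.ofList (PySem.Chars.strip seg) == "") = false := by
          simp only [beq_eq_false_iff_ne, ne_eq]
          intro he
          exact hs (by simpa using congrArg String.toList he)
        rw [h1]; simp [ih]

-- A in canonical form: zip the fields with the tokens, flag the overflow
lemma A_canonical (raw : String) :
    parse_compact_positional_py raw =
      (pcFields.zip (pcToks raw.toList []),
       ((pcToks raw.toList []).drop pcFields.length).map pcFlag) := by
  unfold parse_compact_positional_py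
  have hsplit : PySem.Str.split? raw "," =
      some ((pcSegs raw.toList []).map String.ofList) := by
    rw [PySem.Str.split?, show (",".toList) = [','] from by decide, PySem.Chars.split?,
      if_neg (by simp), splitOn_comma]
    rfl
  rw [hsplit]
  simp only [Option.getD_some, List.map_map]
  have hcomp : (pcSegs raw.toList []).map (PySem.Str.strip ∘ String.ofList) =
      (pcSegs raw.toList []).map (fun seg => String.ofList (PySem.Chars.strip seg)) :=
    List.map_congr_left (fun seg _ => strip_ofList seg)
  rw [hcomp, mapStripFilter_eq_filterMap,
    show (List.filterMap (fun seg => if PySem.Chars.strip seg = [] then none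
      else some (String.ofList (PySem.Chars.strip seg))) (pcSegs raw.toList [])) =
      pcToks raw.toList [] from rfl]
  have h := pcLoopA_spec (pcToks raw.toList []) 0 PySem.Dict.empty [] (by simp [PySem.Dict.keys_empty])
  rw [Nat.cast_zero] at h
  simp only [h]
  rfl

-- pcToks through one flushed segment
lemma pcToks_cons_comma (rest p : List Char) :
    pcToks (',' :: rest) p =
      (if PySem.Chars.strip p = [] then pcToks rest []
       else String.ofList (PySem.Chars.strip p) :: pcToks rest []) := by
  unfold pcToks
  rw [show pcSegs (',' :: rest) p = p :: pcSegs rest [] from by rw [pcSegs, if_pos rfl]]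
  rw [List.filterMap_cons]
  split_ifs <;> simp

lemma pcToks_cons_other (c : Char) (rest p : List Char) (hc : c ≠ ',') :
    pcToks (c :: rest) p = pcToks rest (p ++ [c]) := by
  unfold pcToks
  rw [show pcSegs (c :: rest) p = pcSegs rest (p ++ [c]) from by rw [pcSegs, if_neg hc]]

-- flushing the buffer: the buffer always holds the lstripped consumed prefix of the
-- current segment, so the pop loop yields exactly strip of the segment head
lemma rtrim_lstrip (p : List Char) :
    pcRtrim (PySem.Chars.lstrip p) = PySem.Chars.strip p := by
  rfl

lemma lstrip_append_single (p : List Char) (c : Char) :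
    PySem.Chars.lstrip (p ++ [c]) =
      (if PySem.Chars.lstrip p = [] then (if PySem.Chars.isspace c then [] else [c])
       else PySem.Chars.lstrip p ++ [c]) := by
  simp only [PySem.Chars.lstrip, List.dropWhile_append]
  split_ifs with h1 h2 h3 h4 <;>
    simp_all [List.dropWhile]

-- the scanner, started on cs ++ [','] with the buffer holding lstrip p, consumes the
-- tokens of pcToks cs p: each one is zipped with the next queued field or flagged
lemma scan_spec (cs : List Char) :
    ∀ (p : List Char) (fields : List String) (parsed : List (String × String)) (flags : List String),
    pcScanB (cs ++ [',']) (PySem.Chars.lstrip p) fields parsed flags =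
      (parsed ++ fields.zip (pcToks cs p),
       flags ++ ((pcToks cs p).drop fields.length).map pcFlag) := by
  induction cs with
  | nil =>
      intro p fields parsed flags
      simp only [List.nil_append]
      rw [pcScanB, if_pos rfl]
      simp only [rtrim_lstrip]
      have htoks : pcToks [] p =
          (if PySem.Chars.strip p = [] then [] else [String.ofList (PySem.Chars.strip p)]) := by
        unfold pcToks pcSegs
        split_ifs with h <;> simp [h]
      by_cases hp : PySem.Chars.strip p = []
      · rw [if_pos hp]
        simp [pcScanB, htoks, hp]
      · rw [if_neg hp]
        cases fields with
        | nil => simp [pcScanB, htoks, hp, pcFlag]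
        | cons f fs => simp [pcScanB, htoks, hp]
  | cons c rest ih =>
      intro p fields parsed flags
      by_cases hc : c = ','
      · subst hc
        rw [List.cons_append, pcScanB, if_pos rfl]
        simp only [rtrim_lstrip]
        rw [pcToks_cons_comma]
        by_cases hp : PySem.Chars.strip p = []
        · rw [if_pos hp, if_pos hp]
          have := ih [] fields parsed flags
          simpa [PySem.Chars.lstrip] using this
        · rw [if_neg hp, if_neg hp]
          cases fields with
          | nil =>
              have h0 := ih [] ([] : List String) parsed
                (flags ++ [pcFlag (String.ofList (PySem.Chars.strip p))])
              simp only [PySem.Chars.lstrip, List.dropWhile_nil] at h0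
              simp only [pcFlag] at h0 ⊢
              simpa using h0
          | cons f fs =>
              have h0 := ih [] fs (parsed ++ [(f, String.ofList (PySem.Chars.strip p))]) flags
              simp only [PySem.Chars.lstrip, List.dropWhile_nil] at h0
              simp [h0]
      · rw [List.cons_append, pcScanB, if_neg hc, pcToks_cons_other c rest p hc]
        by_cases hb : PySem.Chars.lstrip p = []
        · by_cases hsp : PySem.Chars.isspace c = true
          · rw [if_neg (by simp [hb, hsp])]
            have hl : PySem.Chars.lstrip (p ++ [c]) = PySem.Chars.lstrip p := by
              rw [lstrip_append_single, if_pos hb, if_pos hsp, hb]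
            rw [← hl]
            exact ih (p ++ [c]) fields parsed flags
          · rw [if_pos (by simp [hsp])]
            have hl : PySem.Chars.lstrip (p ++ [c]) = PySem.Chars.lstrip p ++ [c] := by
              rw [lstrip_append_single, if_pos hb, if_neg (by simpa using hsp), hb]
              simp
            rw [← hl]
            exact ih (p ++ [c]) fields parsed flags
        · rw [if_pos (by simp [hb])]
          have hl : PySem.Chars.lstrip (p ++ [c]) = PySem.Chars.lstrip p ++ [c] := by
            rw [lstrip_append_single, if_neg hb]
          rw [← hl]
          exact ih (p ++ [c]) fields parsed flags

-- ===== VERDICT (by name: the statement is the Claim_ definition above) =====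
theorem parse_compact_positional_py_spec : Claim_equal_parse_compact_positional_py := by
  intro raw _
  unfold Spec_parse_compact_positional_py parse_compact_positional_py_alt
  rw [A_canonical]
  have h := scan_spec raw.toList [] pcFields [] []
  simp only [PySem.Chars.lstrip, List.dropWhile_nil] at h
  rw [h]
  simp
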